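-- pv_equiv track=rewrite | github.com/youmean0427/Algorithm | 프로그래머스/Lv.2/138476. 귤 고르기/귤 고르기.py | solution
-- ===== SOURCE A (Python) =====
-- def solution(k, tangerine):
--     answer = 0
--     cnt = {}
--     for i in tangerine:
--         cnt[i] = cnt[i] + 1 if i in cnt else 1
--
--     cnt = sorted(cnt.items(), key = lambda x: -x[1])
--
--     ans = []
--     while k > 0:
--         x, y = cnt.pop(0)
--         k -= y
--         ans.append(x)
--
--     answer = len(ans)
--     return answer
-- ===== SOURCE B (Python) =====
-- def solution(k, tangerine):
--     # Count sizes, then one pass over the counts sorted descending with a running sum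
--     # (no repeated list.pop(0)).
--     cnt = {}
--     for t in tangerine:
--         cnt[t] = cnt.get(t, 0) + 1
--     total = 0
--     picked = 0
--     for c in sorted(cnt.values(), reverse=True):
--         if total >= k:
--             break
--         total += c
--         picked += 1
--     return picked
-- ===== Notes on version B (the rewrite author's own statement) =====
-- stated objective: faster
-- what changed: B sorts just the counts descending and takes a single running-sum pass with an index counter, instead of A's repeated list.pop(0) from the sorted items list (O(n) per pop).
import Mathlib
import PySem

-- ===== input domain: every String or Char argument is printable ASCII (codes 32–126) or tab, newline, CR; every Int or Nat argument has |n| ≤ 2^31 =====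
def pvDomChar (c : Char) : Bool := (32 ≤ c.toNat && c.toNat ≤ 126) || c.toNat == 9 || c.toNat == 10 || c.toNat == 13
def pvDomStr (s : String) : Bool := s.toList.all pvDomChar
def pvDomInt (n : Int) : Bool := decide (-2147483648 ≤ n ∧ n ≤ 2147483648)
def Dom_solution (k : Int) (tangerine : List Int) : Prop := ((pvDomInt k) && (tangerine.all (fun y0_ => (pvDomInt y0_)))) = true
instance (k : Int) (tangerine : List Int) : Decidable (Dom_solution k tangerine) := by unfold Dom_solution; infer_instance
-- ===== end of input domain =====

-- B replaces A's repeated list.pop(0) over the sorted items by one running-sum pass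
-- over the counts sorted descending (objective: faster).

-- ===== PORT A =====
-- the 'while k > 0: x, y = cnt.pop(0); k -= y; ans.append(x)' loop; returns len(ans).
-- on '[]' with k > 0 Python raises IndexError (excluded by Pre_solution); 0 there is arbitrary.
def solutionLoopA : List (Int × Int) → Int → Int
  | [], _ => 0
  | (_, y) :: rest, k => if k > 0 then 1 + solutionLoopA rest (k - y) else 0

def solution (k : Int) (tangerine : List Int) : Int :=
  let cnt := tangerine.foldl
    (fun d i => d.insert i (if d.contains i then d.getD i 0 + 1 else 1))
    (PySem.Dict.empty : PySem.Dict Int Int)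
  let cntSorted := PySem.List.sorted cnt.items (fun x => -x.2) false
  solutionLoopA cntSorted k

-- ===== PORT B =====
def solution_alt (k : Int) (tangerine : List Int) : Int :=
  let cnt := tangerine.foldl
    (fun d t => d.insert t (d.getD t 0 + 1))
    (PySem.Dict.empty : PySem.Dict Int Int)
  (((PySem.List.sorted cnt.values (fun c => c) true).foldl
      (fun (st : Int × Int) c => if st.1 ≥ k then st else (st.1 + c, st.2 + 1))
      (0, 0)).2)

-- ===== PRECONDITION & SPEC =====
-- A raises IndexError when k > len(tangerine) (the pops exhaust the list); Pre_ excludes exactly those.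
def Pre_solution (k : Int) (tangerine : List Int) : Prop := k ≤ (tangerine.length : Int)
instance (k : Int) (tangerine : List Int) : Decidable (Pre_solution k tangerine) := by
  unfold Pre_solution; infer_instance
def pvWitness_solution : Int × List Int := (2, [1, 1, 2])

def Spec_solution (k : Int) (tangerine : List Int) (out : Int) : Prop := out = solution_alt k tangerine
instance (k : Int) (tangerine : List Int) (out : Int) : Decidable (Spec_solution k tangerine out) := by unfold Spec_solution; infer_instance

-- ===== CLAIM (what is proved, stated in full; the proofs are below) =====
def Claim_equal_solution : Prop := ∀ (k : Int) (tangerine : List Int), Dom_solution k tangerine → Pre_solution k tangerine → Spec_solution k tangerine (solution k tangerine)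
-- ===== LEMMAS AND PROOFS =====

-- the two counting loops build the same dict
lemma count_dicts_eq (tangerine : List Int) :
    tangerine.foldl
      (fun d i => d.insert i (if d.contains i then d.getD i 0 + 1 else 1))
      (PySem.Dict.empty : PySem.Dict Int Int)
    = tangerine.foldl
      (fun d t => d.insert t (d.getD t 0 + 1))
      (PySem.Dict.empty : PySem.Dict Int Int) := by
  apply PySem.List.foldl_congr_mem
  intro d i _
  by_cases h : d.contains i = true
  · simp [h]
  · simp only [Bool.not_eq_true] at h
    rw [PySem.Dict.getD_of_not_contains _ _ h]
    simp [h]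

-- A's pop loop only looks at the counts (second components)
def countLoop : List Int → Int → Int
  | [], _ => 0
  | c :: rest, k => if k > 0 then 1 + countLoop rest (k - c) else 0

lemma solutionLoopA_eq_countLoop (l : List (Int × Int)) (k : Int) :
    solutionLoopA l k = countLoop (l.map Prod.snd) k := by
  induction l generalizing k with
  | nil => rfl
  | cons p rest ih =>
    obtain ⟨x, y⟩ := p
    simp [solutionLoopA, countLoop, ih]

lemma countLoop_nonpos (l : List Int) (k : Int) (hk : k ≤ 0) : countLoop l k = 0 := by
  cases l with
  | nil => rfl
  | cons c rest => simp [countLoop]; omega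

-- B's fold with running sum counts exactly countLoop
lemma foldl_eq_countLoop (k : Int) (l : List Int) (t p : Int) :
    (l.foldl (fun (st : Int × Int) c => if st.1 ≥ k then st else (st.1 + c, st.2 + 1)) (t, p)).2
    = if t ≥ k then p else p + countLoop l (k - t) := by
  induction l generalizing t p with
  | nil => simp [countLoop]
  | cons c rest ih =>
    rw [List.foldl_cons]
    by_cases h : t ≥ k
    · rw [if_pos h, ih, if_pos h, if_pos h]
    · rw [if_neg h, ih, if_neg h]
      have h3 : countLoop (c :: rest) (k - t) = 1 + countLoop rest (k - t - c) := by
        simp only [countLoop]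
        rw [if_pos (show k - t > 0 by omega)]
      rw [h3]
      by_cases h2 : t + c ≥ k
      · rw [if_pos h2, countLoop_nonpos rest (k - t - c) (by omega)]; ring
      · rw [if_neg h2, show k - (t + c) = k - t - c by ring]; ring

-- the counts seen by A (second components of the items sorted by -count) equal the
-- values sorted descending: both are descending permutations of the same list of Ints
lemma sorted_snd_eq (items : List (Int × Int)) :
    (PySem.List.sorted items (fun x => -x.2) false).map Prod.snd
    = PySem.List.sorted (items.map (fun p => p.2)) (fun c => c) true := by
  have hperm : ((PySem.List.sorted items (fun x => -x.2) false).map Prod.snd).Perm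
      (PySem.List.sorted (items.map (fun p => p.2)) (fun c => c) true) :=
    ((PySem.List.sorted_perm items (fun x => -x.2) false).map Prod.snd).trans
      (PySem.List.sorted_perm (items.map (fun p => p.2)) (fun c => c) true).symm
  have h1 : ((PySem.List.sorted items (fun x => -x.2) false).map Prod.snd).Pairwise
      (fun a b : Int => b ≤ a) :=
    (PySem.List.sorted_pairwise items (fun x => -x.2)).map Prod.snd
      (fun a b h => by simpa using h)
  have h2 : (PySem.List.sorted (items.map (fun p => p.2)) (fun c => c) true).Pairwise
      (fun a b : Int => b ≤ a) :=
    PySem.List.sorted_pairwise_rev _ _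
  exact hperm.eq_of_pairwise (fun a b _ _ hab hba => le_antisymm hba hab) h1 h2

-- ===== VERDICT (by name: the statement is the Claim_ definition above) =====
theorem solution_spec : Claim_equal_solution := by
  intro k tangerine _ hpre
  unfold Pre_solution at hpre
  unfold Spec_solution solution solution_alt
  rw [count_dicts_eq, solutionLoopA_eq_countLoop]
  set d := tangerine.foldl
    (fun dd t => dd.insert t (dd.getD t 0 + 1))
    (PySem.Dict.empty : PySem.Dict Int Int) with hd
  have hvals : d.values = d.items.map (fun p => p.2) := rfl
  rw [show (PySem.List.sorted d.items (fun x => -x.2) false).map Prod.snd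
      = PySem.List.sorted d.values (fun c => c) true by
    rw [hvals]; exact sorted_snd_eq d.items]
  rw [foldl_eq_countLoop]
  by_cases h0 : (0 : Int) ≥ k
  · rw [if_pos h0, countLoop_nonpos _ k (by omega)]
  · rw [if_neg h0]
    simp only [sub_zero, zero_add]
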